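-- pv_equiv track=rewrite | github.com/sebpouteau/PhotoEnix | traitement.py | minimum_maximum
-- ===== SOURCE A (Python) =====
-- def minimum_maximum(tableau):
--     minimum=tableau[0][0]
--     maximum=tableau[0][0]
--     for i in range(len(tableau)):
--         for j in range(len(tableau[0])):
--             if minimum > tableau[i][j]:
--                 minimum = tableau[i][j]
--             if maximum < tableau[i][j]:
--                 maximum=tableau[i][j]
--     if maximum>255:
--         maximum=255
--     if minimum<0:
--         minimum=0
--     return minimum, maximum
-- ===== SOURCE B (Python) =====
-- def minimum_maximum(tableau):
--     w = len(tableau[0])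
--     vals = sorted(x for row in tableau for x in row[:w])
--     return max(vals[0], 0), min(vals[-1], 255)
-- ===== Notes on version B (the rewrite author's own statement) =====
-- stated objective: alternative
-- what changed: Replaces A's nested index loops carrying a combined (min,max) accumulator with a sort-based approach: flatten the table (rows truncated to the first row's width), sort the values once, and read the extremes off the ends of the sorted list before clamping.
import Mathlib
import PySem

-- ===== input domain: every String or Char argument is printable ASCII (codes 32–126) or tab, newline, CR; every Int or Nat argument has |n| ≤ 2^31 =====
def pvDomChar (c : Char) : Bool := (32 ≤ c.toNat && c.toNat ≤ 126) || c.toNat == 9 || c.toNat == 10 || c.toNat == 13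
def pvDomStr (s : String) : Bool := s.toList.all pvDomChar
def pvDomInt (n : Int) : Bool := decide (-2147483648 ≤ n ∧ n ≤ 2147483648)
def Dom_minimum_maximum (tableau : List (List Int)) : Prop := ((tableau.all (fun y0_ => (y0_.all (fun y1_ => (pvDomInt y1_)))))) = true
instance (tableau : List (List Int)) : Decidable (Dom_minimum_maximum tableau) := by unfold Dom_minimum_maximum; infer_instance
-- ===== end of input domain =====

-- B flattens the table (rows truncated to the first row's width), sorts the values once,
-- and reads the extremes off the ends of the sorted list before clamping (objective: alternative,
-- a sort-based algorithm instead of A's nested index loops with a combined (min,max) scan).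


-- ===== PORT A =====
-- literal transliteration: combined (min,max) scan over i in range(len(tableau)), j in range(len(tableau[0])),
-- then clamps.  Indexing tableau[i][j] is total here via getD; Pre_ keeps exactly the inputs where Python indexing succeeds.
def minimum_maximum (tableau : List (List Int)) : Int × Int :=
  let first := (tableau.headD []).headD 0
  let mm := (List.range tableau.length).foldl (fun (mm : Int × Int) i =>
      (List.range (tableau.headD []).length).foldl (fun (mm : Int × Int) j =>
        let v := (tableau.getD i []).getD j 0
        let mn := if mm.1 > v then v else mm.1
        let mx := if mm.2 < v then v else mm.2
        (mn, mx)) mm) (first, first)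
  let mx := if mm.2 > 255 then 255 else mm.2
  let mn := if mm.1 < 0 then 0 else mm.1
  (mn, mx)

-- ===== PORT B =====
-- literal transliteration of Source B: flatten with rows truncated to the first row's width,
-- sort once (Python's sorted = PySem.List.sorted), take the first and last elements, clamp.
-- vals[0] / vals[-1] raise on an empty list outside Pre_; headD/getLastD totalize them here.
def minimum_maximum_alt (tableau : List (List Int)) : Int × Int :=
  let w := (tableau.headD []).length
  let vals := PySem.List.sorted (tableau.flatMap (fun row => row.take w)) (fun x => x) false
  (max (vals.headD 0) 0, min (vals.getLastD 0) 255)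

-- ===== PRECONDITION & SPEC =====
-- Pre_ excludes exactly the inputs where A raises IndexError: an empty table, an empty first row,
-- or some row shorter than the first row (A indexes every row up to the first row's width).
def Pre_minimum_maximum (tableau : List (List Int)) : Prop :=
  tableau ≠ [] ∧ tableau.headD [] ≠ [] ∧ ∀ row ∈ tableau, (tableau.headD []).length ≤ row.length
instance (tableau : List (List Int)) : Decidable (Pre_minimum_maximum tableau) := by
  unfold Pre_minimum_maximum; infer_instance

def pvWitness_minimum_maximum : List (List Int) := [[1, 300], [-4, 7]]

def Spec_minimum_maximum (tableau : List (List Int)) (out : Int × Int) : Prop := out = minimum_maximum_alt tableau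
instance (tableau : List (List Int)) (out : Int × Int) : Decidable (Spec_minimum_maximum tableau out) := by unfold Spec_minimum_maximum; infer_instance

-- ===== CLAIM (what is proved, stated in full; the proofs are below) =====
def Claim_equal_minimum_maximum : Prop := ∀ (tableau : List (List Int)), Dom_minimum_maximum tableau → Pre_minimum_maximum tableau → Spec_minimum_maximum tableau (minimum_maximum tableau)

-- ===== LEMMAS AND PROOFS =====

-- the values an index loop 'for j in range(w): … r[j] …' visits are exactly r.take w (when w ≤ |r|)
theorem map_range_getD (r : List Int) (w : Nat) (h : w ≤ r.length) :
    (List.range w).map (fun j => r.getD j 0) = r.take w := by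
  apply List.ext_getElem
  · simp [h]
  · intro i h1 h2
    simp at h1
    simp [Nat.lt_of_lt_of_le h1 h]

theorem map_range_getD_rows (t : List (List Int)) :
    (List.range t.length).map (fun i => t.getD i []) = t := by
  apply List.ext_getElem
  · simp
  · intro i h1 h2
    simp at h1
    simp [h1]

-- the combined (min,max) scan splits into two independent folds
theorem foldl_minmax_split (l : List Int) (a b : Int) :
    l.foldl (fun (mm : Int × Int) v => (min mm.1 v, max mm.2 v)) (a, b)
      = (l.foldl min a, l.foldl max b) := by
  induction l generalizing a b with
  | nil => rfl
  | cons x xs ih => simp [List.foldl_cons, ih]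

-- A's inner loop body as a named function (definitionally equal to the port's inner fold)
def scanRow (w : Nat) (mm : Int × Int) (row : List Int) : Int × Int :=
  (List.range w).foldl (fun mm j =>
    ((if mm.1 > row.getD j 0 then row.getD j 0 else mm.1),
     (if mm.2 < row.getD j 0 then row.getD j 0 else mm.2))) mm

theorem scanRow_eq (w : Nat) (row : List Int) (h : w ≤ row.length) (mm : Int × Int) :
    scanRow w mm row
      = (row.take w).foldl (fun (mm : Int × Int) v => (min mm.1 v, max mm.2 v)) mm := by
  unfold scanRow
  rw [← map_range_getD row w h, List.foldl_map]
  apply PySem.List.foldl_congr_mem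
  intro acc j _
  simp only [Prod.mk.injEq]
  constructor <;> omega

theorem getLastD_mem (s : List Int) (h : s ≠ []) : s.getLastD 0 ∈ s := by
  cases s with
  | nil => exact absurd rfl h
  | cons a t =>
    rw [List.getLastD_eq_getLast?, List.getLast?_eq_some_getLast (by simp)]
    exact List.getLast_mem _

theorem pairwise_le_getLastD (s : List Int) (hp : s.Pairwise (· ≤ ·)) :
    ∀ y ∈ s, y ≤ s.getLastD 0 := by
  induction s with
  | nil => intro y hy; simp at hy
  | cons a t ih =>
    intro y hy
    rcases List.pairwise_cons.mp hp with ⟨ha, hpt⟩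
    cases t with
    | nil => simp at hy; simp [hy]
    | cons b u =>
      have hlast : (a :: b :: u).getLastD 0 = (b :: u).getLastD 0 := by simp
      rw [hlast]
      rcases List.mem_cons.mp hy with rfl | hyt
      · exact ha _ (getLastD_mem (b::u) (by simp))
      · exact ih hpt y hyt

theorem sorted_headD_eq_foldl_min (x : Int) (xs : List Int) :
    (PySem.List.sorted (x :: xs) (fun v => v) false).headD 0 = xs.foldl min x := by
  have hmin : (x :: xs).min? = some (xs.foldl min x) := List.min?_cons'
  rcases (List.min?_eq_some_iff).mp hmin with ⟨hmem, hle⟩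
  rcases hs : PySem.List.sorted (x :: xs) (fun v => v) false with _ | ⟨m, t⟩
  · exact absurd ((PySem.List.sorted_eq_nil_iff _ _ _).mp hs) (by simp)
  · have h1 : m ≤ xs.foldl min x := PySem.List.key_head_sorted_le _ _ hs _ hmem
    have h2 : xs.foldl min x ≤ m :=
      hle m ((PySem.List.mem_sorted _ _ _ m).mp (hs ▸ List.mem_cons_self ..))
    simpa using le_antisymm h1 h2

theorem sorted_getLastD_eq_foldl_max (x : Int) (xs : List Int) :
    (PySem.List.sorted (x :: xs) (fun v => v) false).getLastD 0 = xs.foldl max x := by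
  have hmax : (x :: xs).max? = some (xs.foldl max x) := List.max?_cons'
  rcases (List.max?_eq_some_iff).mp hmax with ⟨hmem, hge⟩
  set s := PySem.List.sorted (x :: xs) (fun v => v) false with hs
  have hne : s ≠ [] := by
    rw [hs]; simp [PySem.List.sorted_eq_nil_iff]
  have hlmem : s.getLastD 0 ∈ x :: xs :=
    (PySem.List.mem_sorted _ _ _ _).mp (getLastD_mem s hne)
  have h1 : s.getLastD 0 ≤ xs.foldl max x := hge _ hlmem
  have h2 : xs.foldl max x ≤ s.getLastD 0 :=
    pairwise_le_getLastD s (PySem.List.sorted_pairwise _ _) _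
      ((PySem.List.mem_sorted _ _ _ _).mpr hmem)
  exact le_antisymm h1 h2

theorem minimum_maximum_spec' (tableau : List (List Int)) (hpre : Pre_minimum_maximum tableau) :
    minimum_maximum tableau = minimum_maximum_alt tableau := by
  obtain ⟨hne, hrow0, hlen⟩ := hpre
  obtain ⟨r0, rest, rfl⟩ : ∃ r0 rest, tableau = r0 :: rest := by
    cases tableau with
    | nil => exact absurd rfl hne
    | cons a l => exact ⟨a, l, rfl⟩
  obtain ⟨x0, r0t, rfl⟩ : ∃ x0 r0t, r0 = x0 :: r0t := by
    cases r0 with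
    | nil => simp at hrow0
    | cons a l => exact ⟨a, l, rfl⟩
  simp only [List.headD_cons] at hlen
  have hcore : ∀ (init : Int × Int),
      (List.range ((x0 :: r0t) :: rest).length).foldl
        (fun (mm : Int × Int) i => scanRow (x0 :: r0t).length mm (((x0 :: r0t) :: rest).getD i [])) init
      = (((x0 :: r0t) :: rest).flatMap (fun row => row.take (x0 :: r0t).length)).foldl
          (fun (mm : Int × Int) v => (min mm.1 v, max mm.2 v)) init := by
    intro init
    have h1 : (List.range ((x0 :: r0t) :: rest).length).foldl
        (fun (mm : Int × Int) i => scanRow (x0 :: r0t).length mm (((x0 :: r0t) :: rest).getD i [])) init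
      = ((List.range ((x0 :: r0t) :: rest).length).map (fun i => ((x0 :: r0t) :: rest).getD i [])).foldl
          (fun (mm : Int × Int) row => scanRow (x0 :: r0t).length mm row) init := List.foldl_map.symm
    rw [h1, map_range_getD_rows, List.foldl_flatMap]
    apply PySem.List.foldl_congr_mem
    intro acc row hmem
    exact scanRow_eq _ _ (hlen row hmem) acc
  unfold minimum_maximum minimum_maximum_alt
  simp only [List.headD_cons]
  rw [show (fun (mm : Int × Int) i =>
        (List.range (x0 :: r0t).length).foldl (fun (mm : Int × Int) j =>
          let v := (((x0 :: r0t) :: rest).getD i []).getD j 0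
          let mn := if mm.1 > v then v else mm.1
          let mx := if mm.2 < v then v else mm.2
          (mn, mx)) mm)
      = (fun (mm : Int × Int) i => scanRow (x0 :: r0t).length mm (((x0 :: r0t) :: rest).getD i [])) from rfl]
  rw [hcore]
  have hflat : ((x0 :: r0t) :: rest).flatMap (fun row => row.take (x0 :: r0t).length) =
      x0 :: (r0t ++ rest.flatMap (fun row => row.take (x0 :: r0t).length)) := by
    simp [List.flatMap_cons]
  rw [hflat, List.foldl_cons, foldl_minmax_split,
      sorted_headD_eq_foldl_min, sorted_getLastD_eq_foldl_max]
  simp only [min_self, max_self, Prod.mk.injEq]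
  constructor <;> omega

-- ===== VERDICT (by name: the statement is the Claim_ definition above) =====
theorem minimum_maximum_spec : Claim_equal_minimum_maximum := by
  intro tableau _ hpre
  exact minimum_maximum_spec' tableau hpre
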